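-- pv_equiv track=rewrite | github.com/Jake-1226/Project-Medi-AI-tor | integrations/racadm_client.py | _parse_hwinv_instances
-- ===== SOURCE A (Python) =====
-- from typing import Dict, Any, Optional, List, Tuple
--
-- def _parse_hwinv_instances(output: str) -> List[Dict[str, str]]:
--     """Parse racadm hwinventory output into a list of instance dicts."""
--     instances = []
--     current = {}
--     for line in output.split('\n'):
--         line = line.strip()
--         if not line or line.startswith('---') or line.startswith('==='):
--             if current:
--                 instances.append(current)
--                 current = {}
--             continue
--         if line.startswith('[InstanceID:') or line.startswith('[Key:'):
--             if current:
--                 instances.append(current)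
--             current = {'_header': line}
--             continue
--         if '=' in line:
--             key, val = line.split('=', 1)
--             current[key.strip()] = val.strip()
--     if current:
--         instances.append(current)
--     return instances
-- ===== SOURCE B (Python) =====
-- def _parse_hwinv_instances(output):
--     """Two-pass parse: partition lines into record groups, then map each group to a dict."""
--     # pass 1: partition stripped lines into record groups of tagged items
--     groups = []
--     cur = None
--     for raw in output.split('\n'):
--         line = raw.strip()
--         if not line or line.startswith('---') or line.startswith('==='):
--             if cur is not None:
--                 groups.append(cur)
--             cur = None
--         elif line.startswith('[InstanceID:') or line.startswith('[Key:'):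
--             if cur is not None:
--                 groups.append(cur)
--             cur = [('H', line, '')]
--         elif '=' in line:
--             key, val = line.split('=', 1)
--             item = ('K', key.strip(), val.strip())
--             cur = [item] if cur is None else cur + [item]
--     if cur is not None:
--         groups.append(cur)
--     # pass 2: each (nonempty by construction) group becomes one instance dict
--     out = []
--     for g in groups:
--         d = {}
--         for tag, a, b in g:
--             d['_header' if tag == 'H' else a] = a if tag == 'H' else b
--         out.append(d)
--     return out
-- ===== Notes on version B (the rewrite author's own statement) =====
-- stated objective: alternative
-- what changed: A's single interleaved accumulate-and-flush loop over lines is re-decomposed into two distinct passes: pass 1 partitions stripped lines into tagged record groups (header/key-value items), pass 2 maps each group to its instance dict.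
import Mathlib
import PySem

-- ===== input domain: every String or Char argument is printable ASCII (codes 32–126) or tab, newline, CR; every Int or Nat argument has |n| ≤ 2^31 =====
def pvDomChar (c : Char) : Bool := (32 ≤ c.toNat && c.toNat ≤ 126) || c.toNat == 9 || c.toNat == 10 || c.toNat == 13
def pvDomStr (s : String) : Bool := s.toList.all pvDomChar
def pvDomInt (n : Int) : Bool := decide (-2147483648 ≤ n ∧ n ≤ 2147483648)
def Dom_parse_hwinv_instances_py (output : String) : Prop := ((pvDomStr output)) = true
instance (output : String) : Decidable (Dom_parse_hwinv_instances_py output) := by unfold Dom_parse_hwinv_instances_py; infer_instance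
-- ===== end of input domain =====

-- B re-decomposes A's single accumulate-and-flush loop into two passes (group the lines, then map each group to a dict); objective: alternative decomposition, same cost.

-- ===== PORT A =====
def pvAStep (st : List (PySem.Dict String String) × PySem.Dict String String) (raw : String) :
    List (PySem.Dict String String) × PySem.Dict String String :=
  let line := PySem.Str.strip raw
  if line = "" || PySem.Str.startswith line "---" || PySem.Str.startswith line "===" then
    if st.2.items = [] then st else (st.1 ++ [st.2], PySem.Dict.empty)
  else if PySem.Str.startswith line "[InstanceID:" || PySem.Str.startswith line "[Key:" then
    ((if st.2.items = [] then st.1 else st.1 ++ [st.2]), PySem.Dict.ofList [("_header", line)])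
  else if PySem.Str.isIn "=" line then
    match PySem.Str.splitMax? line "=" 1 with
    | some (key :: val :: _) => (st.1, st.2.insert (PySem.Str.strip key) (PySem.Str.strip val))
    | _ => st
  else st

def parse_hwinv_instances_py (output : String) : List (List (String × String)) :=
  let fin := ((PySem.Str.split? output "\n").getD []).foldl pvAStep ([], PySem.Dict.empty)
  (if fin.2.items = [] then fin.1 else fin.1 ++ [fin.2]).map (fun d => d.items)

-- ===== PORT B =====
-- pass-1 step: partition stripped lines into tagged record groups ('H' header / 'K' key-value items)
def pvBStep (st : List (List (String × String × String)) × Option (List (String × String × String)))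
    (raw : String) :
    List (List (String × String × String)) × Option (List (String × String × String)) :=
  let line := PySem.Str.strip raw
  if line = "" || PySem.Str.startswith line "---" || PySem.Str.startswith line "===" then
    ((match st.2 with | some g => st.1 ++ [g] | none => st.1), none)
  else if PySem.Str.startswith line "[InstanceID:" || PySem.Str.startswith line "[Key:" then
    ((match st.2 with | some g => st.1 ++ [g] | none => st.1), some [("H", line, "")])
  else if PySem.Str.isIn "=" line then
    match PySem.Str.splitMax? line "=" 1 with
    | some (key :: val :: _) =>
      let item : String × String × String := ("K", PySem.Str.strip key, PySem.Str.strip val)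
      (st.1, some (match st.2 with | none => [item] | some g => g ++ [item]))
    | _ => st
  else st

-- pass-2: one group becomes one instance dict
def pvToDict (g : List (String × String × String)) : PySem.Dict String String :=
  g.foldl (fun d it =>
      d.insert (if it.1 = "H" then "_header" else it.2.1)
               (if it.1 = "H" then it.2.1 else it.2.2)) PySem.Dict.empty

def parse_hwinv_instances_py_alt (output : String) : List (List (String × String)) :=
  let p1 := ((PySem.Str.split? output "\n").getD []).foldl pvBStep ([], none)
  let groups := match p1.2 with | some g => p1.1 ++ [g] | none => p1.1
  (groups.foldl (fun out g => out ++ [pvToDict g]) []).map (fun d => d.items)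

-- ===== PRECONDITION & SPEC =====
def Spec_parse_hwinv_instances_py (output : String) (out : List (List (String × String))) : Prop := out = parse_hwinv_instances_py_alt output
instance (output : String) (out : List (List (String × String))) : Decidable (Spec_parse_hwinv_instances_py output out) := by unfold Spec_parse_hwinv_instances_py; infer_instance

-- ===== CLAIM (what is proved, stated in full; the proofs are below) =====
def Claim_equal_parse_hwinv_instances_py : Prop := ∀ (output : String), Dom_parse_hwinv_instances_py output → Spec_parse_hwinv_instances_py output (parse_hwinv_instances_py output)

-- ===== LEMMAS AND PROOFS =====
def pvOcD (oc : Option (List (String × String × String))) : PySem.Dict String String :=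
  match oc with | none => PySem.Dict.empty | some g => pvToDict g

def pvInv (oc : Option (List (String × String × String))) : Prop :=
  ∀ g, oc = some g → (pvToDict g).items ≠ []

theorem pv_items_insert_ne_nil (d : PySem.Dict String String) (k v : String) :
    (d.insert k v).items ≠ [] := by
  by_cases h : d.contains k = true
  · rw [PySem.Dict.items_insert_of_contains d v h]
    intro he
    have hnil : d.items = [] := List.map_eq_nil_iff.mp he
    have hk : k ∈ d.keys := (PySem.Dict.contains_iff_mem_keys d k).mp h
    simp [PySem.Dict.keys, hnil] at hk
  · rw [PySem.Dict.items_insert_of_not_contains d v (by simpa using h)]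
    simp

theorem pvToDict_append_K (g : List (String × String × String)) (k v : String) :
    pvToDict (g ++ [("K", k, v)]) = (pvToDict g).insert k v := by
  simp [pvToDict, List.foldl_append]

theorem pv_empty_items : (PySem.Dict.empty : PySem.Dict String String).items = [] := rfl

theorem pvHeaderDict (l : String) :
    PySem.Dict.ofList [("_header", l)] = pvToDict [("H", l, "")] := rfl

set_option maxHeartbeats 1000000 in
theorem pvStep_sim (raw : String) (gs : List (List (String × String × String)))
    (oc : Option (List (String × String × String))) (h : pvInv oc) :
    pvAStep (gs.map pvToDict, pvOcD oc) raw
      = ((pvBStep (gs, oc) raw).1.map pvToDict, pvOcD (pvBStep (gs, oc) raw).2)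
      ∧ pvInv (pvBStep (gs, oc) raw).2 := by
  cases oc with
  | none =>
    simp only [pvAStep, pvBStep, pvOcD, pv_empty_items]
    split_ifs with h1 h2
    · exact ⟨rfl, fun g hg => by cases hg⟩
    · refine ⟨rfl, fun g hg => ?_⟩
      cases hg
      exact pv_items_insert_ne_nil PySem.Dict.empty "_header" (PySem.Str.strip raw)
    · cases hsp : PySem.Str.splitMax? (PySem.Str.strip raw) "=" 1 with
      | none => exact ⟨rfl, fun g hg => by cases hg⟩
      | some parts =>
        match parts with
        | [] => exact ⟨rfl, fun g hg => by cases hg⟩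
        | [x] => exact ⟨rfl, fun g hg => by cases hg⟩
        | key :: val :: rest =>
          refine ⟨rfl, fun g hg => ?_⟩
          cases hg
          exact pv_items_insert_ne_nil PySem.Dict.empty (PySem.Str.strip key) (PySem.Str.strip val)
    · exact ⟨rfl, fun g hg => by cases hg⟩
  | some g0 =>
    have hne : (pvToDict g0).items ≠ [] := h g0 rfl
    simp only [pvAStep, pvBStep, pvOcD, if_neg hne]
    split_ifs with h1 h2
    · exact ⟨by simp [List.map_append], fun g hg => by cases hg⟩
    · refine ⟨by simp [List.map_append, pvHeaderDict], fun g hg => ?_⟩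
      cases hg
      exact pv_items_insert_ne_nil PySem.Dict.empty "_header" (PySem.Str.strip raw)
    · cases hsp : PySem.Str.splitMax? (PySem.Str.strip raw) "=" 1 with
      | none => exact ⟨rfl, h⟩
      | some parts =>
        match parts with
        | [] => exact ⟨rfl, h⟩
        | [x] => exact ⟨rfl, h⟩
        | key :: val :: rest =>
          refine ⟨by simp [pvToDict_append_K], fun g hg => ?_⟩
          have hg' : g = g0 ++ [("K", PySem.Str.strip key, PySem.Str.strip val)] :=
            (Option.some.inj hg).symm
          rw [hg', pvToDict_append_K]
          exact pv_items_insert_ne_nil _ _ _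
    · exact ⟨rfl, h⟩

theorem pvFold_sim : ∀ (ls : List String) (gs : List (List (String × String × String)))
    (oc : Option (List (String × String × String))), pvInv oc →
    ls.foldl pvAStep (gs.map pvToDict, pvOcD oc)
      = ((ls.foldl pvBStep (gs, oc)).1.map pvToDict, pvOcD (ls.foldl pvBStep (gs, oc)).2)
      ∧ pvInv (ls.foldl pvBStep (gs, oc)).2 := by
  intro ls
  induction ls with
  | nil => intro gs oc h; exact ⟨rfl, h⟩
  | cons raw rest ih =>
    intro gs oc h
    obtain ⟨hst, hinv⟩ := pvStep_sim raw gs oc h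
    rcases hB : pvBStep (gs, oc) raw with ⟨gs', oc'⟩
    rw [hB] at hst hinv
    simp only [List.foldl_cons, hst, hB]
    exact ih gs' oc' hinv

-- ===== VERDICT (by name: the statement is the Claim_ definition above) =====
theorem parse_hwinv_instances_py_spec : Claim_equal_parse_hwinv_instances_py := by
  intro output _
  unfold Spec_parse_hwinv_instances_py parse_hwinv_instances_py parse_hwinv_instances_py_alt
  have h0 : pvInv (none : Option (List (String × String × String))) := by
    intro g hg; cases hg
  obtain ⟨hst, hinv⟩ := pvFold_sim ((PySem.Str.split? output "\n").getD []) [] none h0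
  rcases hB : ((PySem.Str.split? output "\n").getD []).foldl pvBStep ([], none) with ⟨gs', oc'⟩
  rw [hB] at hst hinv
  have h0' : (([] : List (List (String × String × String))).map pvToDict, pvOcD none)
      = (([] : List (PySem.Dict String String)), PySem.Dict.empty) := by simp [pvOcD]
  rw [h0'] at hst
  simp only [hst]
  simp only [PySem.List.foldl_append_singleton_eq_map, List.nil_append]
  cases oc' with
  | none => simp [pvOcD, pv_empty_items, List.map_map]
  | some g =>
    have hne : (pvToDict g).items ≠ [] := hinv g rfl
    simp [pvOcD, hne, List.map_append]
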